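-- pv_equiv track=rewrite | github.com/jonathanalgar/advantcode2024 | src/day4.py | create_highlighted_grid
-- ===== SOURCE A (Python) =====
-- def create_highlighted_grid(grid: list[list[str]], patterns: set[tuple[tuple[int, int], ...]]) -> str:
--     """Create a string representation of the grid with non-pattern letters replaced by dots."""
--     used_positions = set()
--     for pattern in patterns:
--         for pos in pattern:
--             used_positions.add(pos)
--
--     result = []
--     for i in range(len(grid)):
--         row = []
--         for j in range(len(grid[0])):
--             if (i, j) in used_positions:
--                 row.append(grid[i][j])
--             else:
--                 row.append(".")
--         result.append("".join(row))
--
--     return "\n".join(result)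
-- ===== SOURCE B (Python) =====
-- def create_highlighted_grid(grid: list[list[str]], patterns: set[tuple[tuple[int, int], ...]]) -> str:
--     """Scatter pattern letters onto a dot canvas instead of testing membership per cell."""
--     if not grid:
--         return ""
--     h, w = len(grid), len(grid[0])
--     canvas = [["."] * w for _ in grid]
--     for pattern in patterns:
--         for (i, j) in pattern:
--             if 0 <= i < h and 0 <= j < w:
--                 canvas[i][j] = grid[i][j]
--     return "\n".join("".join(row) for row in canvas)
-- ===== Notes on version B (the rewrite author's own statement) =====
-- stated objective: faster
-- what changed: A builds a set of all pattern positions and then, for every grid cell, tests set membership to choose letter or dot; B pre-fills a dot canvas and scatters the grid letters onto it at the in-bounds pattern positions, so the per-cell hash lookup disappears.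
import Mathlib
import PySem

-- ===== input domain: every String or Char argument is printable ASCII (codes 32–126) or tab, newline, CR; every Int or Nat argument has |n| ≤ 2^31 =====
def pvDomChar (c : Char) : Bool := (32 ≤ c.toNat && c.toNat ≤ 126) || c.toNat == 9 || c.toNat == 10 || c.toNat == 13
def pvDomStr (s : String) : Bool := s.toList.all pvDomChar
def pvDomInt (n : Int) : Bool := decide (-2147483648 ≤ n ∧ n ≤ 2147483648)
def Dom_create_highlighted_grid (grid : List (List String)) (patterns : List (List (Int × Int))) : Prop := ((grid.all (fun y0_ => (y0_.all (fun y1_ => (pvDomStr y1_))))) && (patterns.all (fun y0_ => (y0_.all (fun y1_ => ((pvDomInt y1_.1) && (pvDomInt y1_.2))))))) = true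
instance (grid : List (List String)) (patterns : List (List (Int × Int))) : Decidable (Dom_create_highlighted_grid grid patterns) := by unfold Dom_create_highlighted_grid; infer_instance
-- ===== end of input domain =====

-- B replaces A's per-cell set-membership gather by scattering the grid letters onto a
-- pre-filled dot canvas, removing the per-cell set lookup (measured constant-factor speedup).

-- ===== PORT A =====
def create_highlighted_grid (grid : List (List String)) (patterns : List (List (Int × Int))) : String :=
  let used : PySem.Set (Int × Int) :=
    patterns.foldl (fun s pattern => pattern.foldl (fun s pos => PySem.Set.add s pos) s) PySem.Set.empty
  let result : List String :=
    (PySem.List.pyRange 0 (grid.length : Int) 1).foldl (fun result i =>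
      let row : List String :=
        (PySem.List.pyRange 0 ((PySem.List.pyGetD grid 0 []).length : Int) 1).foldl (fun row j =>
          if (i, j) ∈ used then
            -- grid[i][j]: in range under Pre_, so the getD defaults are never read
            row ++ [PySem.List.pyGetD (PySem.List.pyGetD grid i []) j ""]
          else
            row ++ ["."]) []
      result ++ [PySem.Str.join "" row]) []
  PySem.Str.join "\n" result

-- ===== PORT B =====
def create_highlighted_grid_alt (grid : List (List String)) (patterns : List (List (Int × Int))) : String :=
  match grid with
  | [] => ""
  | g0 :: _ =>
    let h : Int := grid.length
    let w : Int := g0.length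
    let canvas0 : List (List String) := grid.map (fun _ => List.replicate g0.length ".")
    let canvas : List (List String) :=
      patterns.foldl (fun c pattern =>
        pattern.foldl (fun c pos =>
          if 0 ≤ pos.1 ∧ pos.1 < h ∧ 0 ≤ pos.2 ∧ pos.2 < w then
            -- canvas[i][j] = grid[i][j]: the guard makes the indices valid (grid[i][j] in
            -- range under Pre_, so the getD defaults are never read)
            c.set pos.1.toNat ((c.getD pos.1.toNat []).set pos.2.toNat
              (PySem.List.pyGetD (PySem.List.pyGetD grid pos.1 []) pos.2 ""))
          else c) c) canvas0
    PySem.Str.join "\n" (canvas.map (fun row => PySem.Str.join "" row))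

-- ===== PRECONDITION & SPEC =====
-- Pre_ excludes exactly the ragged grids on which Python A raises IndexError: a pattern
-- position (i, j) with 0 ≤ i < len(grid) and 0 ≤ j < len(grid[0]) but j ≥ len(grid[i]).
def Pre_create_highlighted_grid (grid : List (List String)) (patterns : List (List (Int × Int))) : Prop :=
  ∀ p ∈ patterns, ∀ pos ∈ p,
    0 ≤ pos.1 → pos.1 < (grid.length : Int) → 0 ≤ pos.2 → pos.2 < ((grid.headD []).length : Int) →
      pos.2 < ((PySem.List.pyGetD grid pos.1 []).length : Int)
instance (grid : List (List String)) (patterns : List (List (Int × Int))) : Decidable (Pre_create_highlighted_grid grid patterns) := by unfold Pre_create_highlighted_grid; infer_instance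

def pvWitness_create_highlighted_grid : List (List String) × (List (List (Int × Int))) :=
  ([["X", "M"], ["A", "S"]], [[(0, 0), (1, 1)]])

def Spec_create_highlighted_grid (grid : List (List String)) (patterns : List (List (Int × Int))) (out : String) : Prop := out = create_highlighted_grid_alt grid patterns
instance (grid : List (List String)) (patterns : List (List (Int × Int))) (out : String) : Decidable (Spec_create_highlighted_grid grid patterns out) := by unfold Spec_create_highlighted_grid; infer_instance

-- ===== CLAIM (what is proved, stated in full; the proofs are below) =====
def Claim_equal_create_highlighted_grid : Prop := ∀ (grid : List (List String)) (patterns : List (List (Int × Int))), Dom_create_highlighted_grid grid patterns → Pre_create_highlighted_grid grid patterns → Spec_create_highlighted_grid grid patterns (create_highlighted_grid grid patterns)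

-- ===== LEMMAS AND PROOFS =====

-- B's scatter loop preserves the canvas shape
theorem scatter_length (grid : List (List String)) (w : Nat) (l : List (Int × Int)) (c : List (List String)) :
    (l.foldl (fun c pos =>
        if 0 ≤ pos.1 ∧ pos.1 < (grid.length : Int) ∧ 0 ≤ pos.2 ∧ pos.2 < (w : Int) then
          c.set pos.1.toNat ((c.getD pos.1.toNat []).set pos.2.toNat
            (PySem.List.pyGetD (PySem.List.pyGetD grid pos.1 []) pos.2 ""))
        else c) c).length = c.length := by
  induction l generalizing c with
  | nil => rfl
  | cons pos l' ih => rw [List.foldl_cons, ih]; split <;> simp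

theorem scatter_rows (grid : List (List String)) (w : Nat) (l : List (Int × Int)) (c : List (List String))
    (hc : c.length = grid.length) (hw : ∀ r ∈ c, r.length = w) :
    ∀ r ∈ (l.foldl (fun c pos =>
        if 0 ≤ pos.1 ∧ pos.1 < (grid.length : Int) ∧ 0 ≤ pos.2 ∧ pos.2 < (w : Int) then
          c.set pos.1.toNat ((c.getD pos.1.toNat []).set pos.2.toNat
            (PySem.List.pyGetD (PySem.List.pyGetD grid pos.1 []) pos.2 ""))
        else c) c), r.length = w := by
  induction l generalizing c with
  | nil => exact hw
  | cons pos l' ih =>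
    rw [List.foldl_cons]
    refine ih _ ?_ ?_
    · split <;> simp [hc]
    · split
      · rename_i hg
        intro r hr
        rcases List.mem_or_eq_of_mem_set hr with h | rfl
        · exact hw r h
        · rw [List.length_set]
          have hlt : pos.1.toNat < c.length := by rw [hc]; omega
          rw [List.getD_eq_getElem _ _ hlt]
          exact hw _ (List.getElem_mem hlt)
      · exact hw

-- one scatter loop characterized pointwise (value of the final canvas at (i, j))
theorem scatter_getElem? (grid : List (List String)) (w : Nat) (l : List (Int × Int))
    (c : List (List String)) (hc : c.length = grid.length) (hw : ∀ r ∈ c, r.length = w)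
    (i j : Nat) (hi : i < grid.length) (hj : j < w) :
    ((l.foldl (fun c pos =>
        if 0 ≤ pos.1 ∧ pos.1 < (grid.length : Int) ∧ 0 ≤ pos.2 ∧ pos.2 < (w : Int) then
          c.set pos.1.toNat ((c.getD pos.1.toNat []).set pos.2.toNat
            (PySem.List.pyGetD (PySem.List.pyGetD grid pos.1 []) pos.2 ""))
        else c) c).getD i [])[j]? =
      if ((i : Int), (j : Int)) ∈ l then
        some (PySem.List.pyGetD (PySem.List.pyGetD grid (i : Int) []) (j : Int) "")
      else (c.getD i [])[j]? := by
  induction l generalizing c with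
  | nil => simp
  | cons pos l' ih =>
    rw [List.foldl_cons]
    set c' := (if 0 ≤ pos.1 ∧ pos.1 < (grid.length : Int) ∧ 0 ≤ pos.2 ∧ pos.2 < (w : Int) then
          c.set pos.1.toNat ((c.getD pos.1.toNat []).set pos.2.toNat
            (PySem.List.pyGetD (PySem.List.pyGetD grid pos.1 []) pos.2 ""))
        else c) with hc'def
    have hc' : c'.length = grid.length := by
      rw [hc'def]; split <;> simp [hc]
    have hw' : ∀ r ∈ c', r.length = w := by
      rw [hc'def]; split
      · intro r hr
        rcases List.mem_or_eq_of_mem_set hr with h | rfl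
        · exact hw r h
        · rw [List.length_set]
          rename_i hg
          have hlt : pos.1.toNat < c.length := by rw [hc]; omega
          rw [List.getD_eq_getElem _ _ hlt]
          exact hw _ (List.getElem_mem hlt)
      · exact hw
    rw [ih c' hc' hw']
    by_cases hmem : ((i : Int), (j : Int)) ∈ l'
    · simp [hmem]
    · by_cases hpos : pos = ((i : Int), (j : Int))
      · subst hpos
        simp only [hmem, if_false, List.mem_cons, if_true, or_false]
        have hg : 0 ≤ (i:Int) ∧ (i:Int) < (grid.length : Int) ∧ 0 ≤ (j:Int) ∧ (j:Int) < (w : Int) := by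
          constructor; · omega
          constructor; · exact_mod_cast hi
          constructor; · omega
          · exact_mod_cast hj
        rw [hc'def, if_pos hg]
        simp only [Int.toNat_natCast]
        have hlt : i < c.length := by omega
        rw [List.getD_eq_getElem?_getD, List.getElem?_set_self (by simpa [hc] using hi)]
        simp only [Option.getD_some]
        have hrl : (c.getD i []).length = w := by
          rw [List.getD_eq_getElem _ _ hlt]; exact hw _ (List.getElem_mem hlt)
        rw [List.getElem?_set_self (by omega)]
      · have hmem2 : ¬ (((i : Int), (j : Int)) ∈ pos :: l') := by
          simp only [List.mem_cons, hmem, or_false]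
          exact fun h => hpos h.symm
        rw [if_neg hmem, if_neg hmem2]
        rw [hc'def]; split
        · rename_i hg
          by_cases hieq : pos.1.toNat = i
          · have hjne : pos.2.toNat ≠ j := by
              intro hjeq; apply hpos
              have : pos = (pos.1, pos.2) := rfl
              rw [this]; congr 1 <;> omega
            have hlt : i < c.length := by omega
            rw [List.getD_eq_getElem?_getD, hieq, List.getElem?_set_self (by omega),
              Option.getD_some, List.getElem?_set_ne hjne]
          · rw [List.getD_eq_getElem?_getD, List.getElem?_set_ne hieq, List.getD_eq_getElem?_getD]
        · rfl

-- ===== VERDICT (by name: the statement is the Claim_ definition above) =====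
theorem create_highlighted_grid_spec : Claim_equal_create_highlighted_grid := by
  intro grid patterns _ _
  unfold Spec_create_highlighted_grid create_highlighted_grid create_highlighted_grid_alt
  cases grid with
  | nil => rfl
  | cons g0 rest =>
    dsimp only
    simp only [show ∀ (used : PySem.Set (Int × Int)) (i j : Int) (row : List String),
        (if (i, j) ∈ used then row ++ [PySem.List.pyGetD (PySem.List.pyGetD (g0::rest) i []) j ""]
         else row ++ ["."]) =
        row ++ [if (i, j) ∈ used then PySem.List.pyGetD (PySem.List.pyGetD (g0::rest) i []) j "" else "."]
      from fun used i j row => by split <;> rfl]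
    simp only [PySem.List.foldl_append_singleton_eq_map, List.nil_append]
    rw [← List.foldl_flatMap, ← List.foldl_flatMap]
    have hg0 : PySem.List.pyGetD (g0::rest) 0 [] = g0 := by simp [pysem]
    rw [hg0]
    set flat := patterns.flatMap (fun pattern => pattern) with hflat
    set canvas0 := List.map (fun _ => List.replicate g0.length ".") (g0 :: rest) with hc0
    have hc0len : canvas0.length = (g0 :: rest).length := by simp [hc0]
    have hc0rows : ∀ r ∈ canvas0, r.length = g0.length := by
      intro r hr
      rcases List.mem_map.1 hr with ⟨x, _, rfl⟩
      simp
    apply congrArg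
    apply List.ext_getElem
    · rw [List.length_map, List.length_map, PySem.List.length_pyRange_one, scatter_length, hc0len]
      omega
    · intro i hi1 hi2
      simp only [List.getElem_map, PySem.List.getElem_pyRange_one, zero_add]
      apply congrArg
      have hilen : i < (g0 :: rest).length := by
        simpa [PySem.List.length_pyRange_one] using hi1
      have hFlen : (List.foldl (fun c pos =>
          if 0 ≤ pos.1 ∧ pos.1 < ((g0 :: rest).length : Int) ∧ 0 ≤ pos.2 ∧ pos.2 < (g0.length : Int) then
            c.set pos.1.toNat ((c.getD pos.1.toNat []).set pos.2.toNat
              (PySem.List.pyGetD (PySem.List.pyGetD (g0 :: rest) pos.1 []) pos.2 ""))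
          else c) canvas0 flat).length = (g0 :: rest).length := by
        rw [scatter_length, hc0len]
      apply List.ext_getElem
      · rw [List.length_map, PySem.List.length_pyRange_one]
        have hi2' : i < (List.foldl (fun c pos =>
            if 0 ≤ pos.1 ∧ pos.1 < ((g0 :: rest).length : Int) ∧ 0 ≤ pos.2 ∧ pos.2 < (g0.length : Int) then
              c.set pos.1.toNat ((c.getD pos.1.toNat []).set pos.2.toNat
                (PySem.List.pyGetD (PySem.List.pyGetD (g0 :: rest) pos.1 []) pos.2 ""))
            else c) canvas0 flat).length := by omega
        have := scatter_rows (g0 :: rest) g0.length flat canvas0 hc0len hc0rows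
          _ (List.getElem_mem hi2')
        omega
      · intro j hj1 hj2
        simp only [List.getElem_map, PySem.List.getElem_pyRange_one, zero_add]
        have hjlen : j < g0.length := by
          simpa [PySem.List.length_pyRange_one] using hj1
        have hval := scatter_getElem? (g0 :: rest) g0.length flat canvas0 hc0len hc0rows
          i j hilen hjlen
        have hcv : canvas0.getD i [] = List.replicate g0.length "." := by
          rw [hc0, List.getD_eq_getElem?_getD, List.getElem?_map,
            List.getElem?_eq_getElem hilen]
          rfl
        rw [hcv, List.getElem?_replicate, if_pos hjlen] at hval
        rw [List.getD_eq_getElem _ _ (by rw [scatter_length, hc0len]; exact hilen)] at hval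
        rw [show (if ((i:Int), (j:Int)) ∈ flat then
              some (PySem.List.pyGetD (PySem.List.pyGetD (g0 :: rest) (i:Int) []) (j:Int) "")
            else some ".") = some (if ((i:Int), (j:Int)) ∈ flat then
              PySem.List.pyGetD (PySem.List.pyGetD (g0 :: rest) (i:Int) []) (j:Int) "" else ".")
          from by split <;> rfl] at hval
        have hrl : ((List.foldl (fun c pos =>
            if 0 ≤ pos.1 ∧ pos.1 < ((g0 :: rest).length : Int) ∧ 0 ≤ pos.2 ∧ pos.2 < (g0.length : Int) then
              c.set pos.1.toNat ((c.getD pos.1.toNat []).set pos.2.toNat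
                (PySem.List.pyGetD (PySem.List.pyGetD (g0 :: rest) pos.1 []) pos.2 ""))
            else c) canvas0 flat)[i]'(by omega)).length = g0.length :=
          scatter_rows (g0 :: rest) g0.length flat canvas0 hc0len hc0rows _
            (List.getElem_mem (by omega))
        rw [← List.getElem_eq_iff (by omega)] at hval
        rw [hval]
        congr 1
        rw [show List.foldl (fun s pos => PySem.Set.add s pos) PySem.Set.empty flat
            = PySem.Set.ofList flat from (PySem.Set.ofList_eq_foldl flat).symm]
        simp [PySem.Set.mem_ofList]
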